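-- pv_equiv track=rewrite | github.com/bmosoluciones/now-lms | dev/delete_py_version.py | strip_version_from_spec
-- ===== SOURCE A (Python) =====
-- OPERATOR_PATTERNS = ["==", ">=", "<=", "~=", "!=", "===", ">", "<", "!="]
--
-- def strip_version_from_spec(spec: str) -> str:
--     # Remove any inline whitespace
--     spec = spec.strip()
--     # Find earliest operator occurrence
--     idx = None
--     for op in OPERATOR_PATTERNS:
--         i = spec.find(op)
--         if i != -1 and (idx is None or i < idx):
--             idx = i
--     if idx is not None:
--         return spec[:idx].strip()
--     # Also handle comma-separated multiple specs like "pkg>=1.0,<2.0"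
--     if "," in spec:
--         return spec.split(",")[0].strip()
--     return spec
-- ===== SOURCE B (Python) =====
-- def strip_version_from_spec(spec: str) -> str:
--     spec = spec.strip()
--     # single left-to-right scan: stop at the first position where an operator starts
--     for i in range(len(spec)):
--         c = spec[i]
--         if c in "<>" or (c in "=~!" and spec.startswith("=", i + 1)):
--             return spec[:i].strip()
--     if "," in spec:
--         return spec.split(",")[0].strip()
--     return spec
-- ===== Notes on version B (the rewrite author's own statement) =====
-- stated objective: alternative
-- what changed: A runs find() over the whole string once per operator and takes the minimum index; B makes a single left-to-right scan over the string, stopping at the first position where any operator starts (a character-class test on the current and next character).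
import Mathlib
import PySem

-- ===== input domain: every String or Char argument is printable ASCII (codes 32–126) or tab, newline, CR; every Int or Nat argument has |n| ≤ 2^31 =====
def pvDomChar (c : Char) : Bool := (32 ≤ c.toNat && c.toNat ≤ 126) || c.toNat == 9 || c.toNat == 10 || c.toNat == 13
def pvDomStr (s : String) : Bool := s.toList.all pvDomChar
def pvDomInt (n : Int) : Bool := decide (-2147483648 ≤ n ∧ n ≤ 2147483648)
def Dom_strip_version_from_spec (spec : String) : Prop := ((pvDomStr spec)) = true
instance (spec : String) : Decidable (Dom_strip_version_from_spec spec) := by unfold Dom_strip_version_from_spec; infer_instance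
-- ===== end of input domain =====

-- B replaces A's per-operator whole-string `find`+min loop by one left-to-right scan that
-- stops at the first position where any operator starts (objective: alternative decomposition).

-- ===== PORT A =====
def pvOps : List String := ["==", ">=", "<=", "~=", "!=", "===", ">", "<", "!="]

-- loop body of A's `for op in OPERATOR_PATTERNS`
def pvStepA (s : String) (idx : Option Int) (op : String) : Option Int :=
  let i := PySem.Str.find s op
  if i != -1 && (idx == none || decide (i < idx.getD 0)) then some i else idx

def strip_version_from_spec (spec : String) : String :=
  let spec := PySem.Str.strip spec
  let idx : Option Int := pvOps.foldl (pvStepA spec) none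
  match idx with
  | some k => PySem.Str.strip (PySem.Str.slice spec none (some k))
  | none =>
    if PySem.Str.isIn "," spec then
      -- spec.split(",")[0] : split with a nonempty separator never yields []
      PySem.Str.strip (((PySem.Str.split? spec ",").getD []).headD "")
    else spec

-- ===== PORT B =====
-- `c in "<>" or (c in "=~!" and spec.startswith("=", i+1))`;
-- startswith("=", i+1) is exactly: the next character is '='
def pvOpAt (c : Char) (rest : List Char) : Bool :=
  c == '<' || c == '>' || ((c == '=' || c == '~' || c == '!') && rest.headD ' ' == '=')

-- B's `for i in range(len(spec))` with early return: first index where an operator starts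
def pvFirstOp : List Char → Option Nat
  | [] => none
  | c :: rest => if pvOpAt c rest then some 0 else (pvFirstOp rest).map (· + 1)

def strip_version_from_spec_alt (spec : String) : String :=
  let s := PySem.Str.strip spec
  match pvFirstOp s.toList with
  | some i => PySem.Str.strip (PySem.Str.slice s none (some (i : Int)))
  | none =>
    if PySem.Str.isIn "," s then
      PySem.Str.strip (((PySem.Str.split? s ",").getD []).headD "")
    else s

-- ===== PRECONDITION & SPEC =====
def Spec_strip_version_from_spec (spec : String) (out : String) : Prop := out = strip_version_from_spec_alt spec
instance (spec : String) (out : String) : Decidable (Spec_strip_version_from_spec spec out) := by unfold Spec_strip_version_from_spec; infer_instance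

-- ===== CLAIM (what is proved, stated in full; the proofs are below) =====
def Claim_equal_strip_version_from_spec : Prop := ∀ (spec : String), Dom_strip_version_from_spec spec → Spec_strip_version_from_spec spec (strip_version_from_spec spec)

-- ===== LEMMAS AND PROOFS =====

-- "some operator starts here" as a predicate on the suffix
def pvHit (l : List Char) : Prop := ∃ op ∈ pvOps, op.toList <+: l

lemma pvHit_iff (c : Char) (rest : List Char) :
    pvOpAt c rest = true ↔ pvHit (c :: rest) := by
  unfold pvHit pvOps pvOpAt
  cases rest with
  | nil => simp [List.cons_prefix_cons]; tauto
  | cons r rs => simp [List.cons_prefix_cons]; aesop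

lemma pvHit_nil : ¬ pvHit ([] : List Char) := by
  unfold pvHit pvOps; simp

lemma pvFirstOp_none (cs : List Char) :
    pvFirstOp cs = none ↔ ∀ i, ¬ pvHit (cs.drop i) := by
  induction cs with
  | nil =>
    simp only [pvFirstOp, List.drop_nil, true_iff]
    intro _; exact pvHit_nil
  | cons c rest ih =>
    by_cases h : pvOpAt c rest = true
    · rw [show pvFirstOp (c :: rest) = some 0 from by simp [pvFirstOp, h]]
      constructor
      · intro hh; cases hh
      · intro hall; exact absurd ((pvHit_iff c rest).1 h) (hall 0)
    · have hnone : pvFirstOp (c :: rest) = none ↔ pvFirstOp rest = none := by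
        simp [pvFirstOp, h]
      rw [hnone, ih]
      constructor
      · intro hall i
        cases i with
        | zero => exact fun hh => h ((pvHit_iff c rest).2 hh)
        | succ n => exact hall n
      · intro hall n; exact hall (n + 1)

lemma pvFirstOp_some (cs : List Char) (i : Nat) (h : pvFirstOp cs = some i) :
    pvHit (cs.drop i) ∧ ∀ j < i, ¬ pvHit (cs.drop j) := by
  induction cs generalizing i with
  | nil => simp [pvFirstOp] at h
  | cons c rest ih =>
    by_cases hc : pvOpAt c rest
    · simp only [pvFirstOp, hc, if_true, Option.some.injEq] at h
      subst h
      exact ⟨(pvHit_iff c rest).1 hc, by omega⟩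
    · rw [show pvFirstOp (c :: rest) = (pvFirstOp rest).map (· + 1) from by
        simp [pvFirstOp, hc]] at h
      cases e : pvFirstOp rest with
      | none => rw [e] at h; simp at h
      | some n =>
        rw [e] at h
        simp only [Option.map_some, Option.some.injEq] at h
        subst h
        obtain ⟨hhit, hmin⟩ := ih n e
        refine ⟨hhit, ?_⟩
        intro j hj
        cases j with
        | zero => exact fun hh => hc ((pvHit_iff c rest).2 hh)
        | succ m => exact hmin m (by omega)

-- find vs prefix-at-drop
lemma pvFind_le (cs : List Char) (op : List Char) (i : Nat) (h : op <+: cs.drop i) :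
    PySem.Chars.find cs op ≠ -1 ∧ PySem.Chars.find cs op ≤ i := by
  have hinf : op <:+: cs := h.isInfix.trans (List.drop_suffix i cs).isInfix
  have hne : PySem.Chars.find cs op ≠ -1 := (PySem.Chars.find_ne_neg_one_iff cs op).2 hinf
  have hnn : 0 ≤ PySem.Chars.find cs op := (PySem.Chars.find_nonneg_iff cs op).2 hinf
  obtain ⟨-, hleast⟩ := PySem.Chars.find_spec hnn
  refine ⟨hne, ?_⟩
  by_contra hlt
  have : i < (PySem.Chars.find cs op).toNat := by omega
  exact hleast i this h

-- A's fold: a helper equation and `some`-preservation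
lemma pvStepA_eq (s : String) (acc : Option Int) (op : String) :
    pvStepA s acc op =
      if (PySem.Chars.find s.toList op.toList != -1 &&
          (acc == none || decide (PySem.Chars.find s.toList op.toList < acc.getD 0))) = true
      then some (PySem.Chars.find s.toList op.toList) else acc := by
  simp [pvStepA]

lemma pvFoldA_isSome (s : String) (ops : List String) (acc : Option Int) (h : acc.isSome) :
    (ops.foldl (pvStepA s) acc).isSome := by
  induction ops generalizing acc with
  | nil => exact h
  | cons op rest ih =>
    refine ih (pvStepA s acc op) ?_
    rw [pvStepA_eq]
    split <;> simp_all

-- A's fold: none iff every find is -1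
lemma pvFoldA_none (s : String) (ops : List String) :
    ops.foldl (pvStepA s) none = none ↔
      ∀ op ∈ ops, PySem.Chars.find s.toList op.toList = -1 := by
  induction ops with
  | nil => simp
  | cons op rest ih =>
    simp only [List.foldl_cons, List.mem_cons]
    by_cases hf : PySem.Chars.find s.toList op.toList = -1
    · have hstep : pvStepA s none op = none := by rw [pvStepA_eq]; simp [hf]
      rw [hstep, ih]
      constructor
      · intro hall o ho; rcases ho with rfl | ho; exacts [hf, hall o ho]
      · intro hall o ho; exact hall o (Or.inr ho)
    · have hstep : pvStepA s none op = some (PySem.Chars.find s.toList op.toList) := by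
        rw [pvStepA_eq]; simp [hf]
      rw [hstep]
      constructor
      · intro hnone
        have := pvFoldA_isSome s rest (some (PySem.Chars.find s.toList op.toList)) (by simp)
        rw [hnone] at this; simp at this
      · intro hall; exact absurd (hall op (Or.inl rfl)) hf

-- A's fold: characterization of a `some` result
lemma pvFoldA_some (s : String) (ops : List String) (acc : Option Int) (k : Int)
    (hacc : ∀ j, acc = some j → 0 ≤ j)
    (h : ops.foldl (pvStepA s) acc = some k) :
    0 ≤ k ∧ (acc = some k ∨ ∃ op ∈ ops, PySem.Chars.find s.toList op.toList = k) ∧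
      (∀ j, acc = some j → k ≤ j) ∧
      (∀ op ∈ ops, PySem.Chars.find s.toList op.toList ≠ -1 →
        k ≤ PySem.Chars.find s.toList op.toList) := by
  induction ops generalizing acc with
  | nil =>
    simp only [List.foldl_nil] at h
    exact ⟨hacc k h, Or.inl h,
      fun j hj => by rw [h] at hj; injection hj with e; omega, by simp⟩
  | cons op rest ih =>
    simp only [List.foldl_cons] at h
    have hF1 : -1 ≤ PySem.Chars.find s.toList op.toList :=
      PySem.Chars.neg_one_le_find s.toList op.toList
    cases acc with
    | none =>
      by_cases hf : PySem.Chars.find s.toList op.toList = -1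
      · have hstep : pvStepA s none op = none := by rw [pvStepA_eq]; simp [hf]
        rw [hstep] at h
        obtain ⟨hk0, hor, _, hlerest⟩ := ih none (by simp) h
        refine ⟨hk0, ?_, by simp, ?_⟩
        · rcases hor with he | ⟨o, ho, hfo⟩
          · simp at he
          · exact Or.inr ⟨o, List.mem_cons_of_mem _ ho, hfo⟩
        · intro o ho hone
          rcases List.mem_cons.1 ho with rfl | ho'
          · exact absurd hf hone
          · exact hlerest o ho' hone
      · have hstep : pvStepA s none op = some (PySem.Chars.find s.toList op.toList) := by
          rw [pvStepA_eq]; simp [hf]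
        rw [hstep] at h
        obtain ⟨hk0, hor, hleacc, hlerest⟩ := ih _ (fun j hj => by injection hj with e; omega) h
        have hkF : k ≤ PySem.Chars.find s.toList op.toList := hleacc _ rfl
        refine ⟨hk0, ?_, by simp, ?_⟩
        · rcases hor with he | ⟨o, ho, hfo⟩
          · injection he with e; exact Or.inr ⟨op, List.mem_cons_self, e⟩
          · exact Or.inr ⟨o, List.mem_cons_of_mem _ ho, hfo⟩
        · intro o ho hone
          rcases List.mem_cons.1 ho with rfl | ho'
          · exact hkF
          · exact hlerest o ho' hone
    | some j =>
      have hj0 : 0 ≤ j := hacc j rfl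
      by_cases hc : PySem.Chars.find s.toList op.toList ≠ -1 ∧
          PySem.Chars.find s.toList op.toList < j
      · have hstep : pvStepA s (some j) op = some (PySem.Chars.find s.toList op.toList) := by
          rw [pvStepA_eq]; simp [hc.1, hc.2]
        rw [hstep] at h
        obtain ⟨hk0, hor, hleacc, hlerest⟩ := ih _ (fun j' hj' => by injection hj' with e; omega) h
        have hkF : k ≤ PySem.Chars.find s.toList op.toList := hleacc _ rfl
        refine ⟨hk0, ?_, ?_, ?_⟩
        · rcases hor with he | ⟨o, ho, hfo⟩
          · injection he with e; exact Or.inr ⟨op, List.mem_cons_self, e⟩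
          · exact Or.inr ⟨o, List.mem_cons_of_mem _ ho, hfo⟩
        · intro j' hj'; injection hj' with e; subst e; omega
        · intro o ho hone
          rcases List.mem_cons.1 ho with rfl | ho'
          · exact hkF
          · exact hlerest o ho' hone
      · have hstep : pvStepA s (some j) op = some j := by
          rw [pvStepA_eq]
          rcases not_and_or.1 hc with h1 | h2
          · simp only [ne_eq, not_not] at h1; simp [h1]
          · have : ¬ PySem.Chars.find s.toList op.toList < j := h2
            simp [this]
        rw [hstep] at h
        obtain ⟨hk0, hor, hleacc, hlerest⟩ := ih (some j) hacc h
        have hkj : k ≤ j := hleacc j rfl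
        refine ⟨hk0, ?_, ?_, ?_⟩
        · rcases hor with he | ⟨o, ho, hfo⟩
          · exact Or.inl he
          · exact Or.inr ⟨o, List.mem_cons_of_mem _ ho, hfo⟩
        · intro j' hj'; injection hj' with e; subst e; exact hkj
        · intro o ho hone
          rcases List.mem_cons.1 ho with rfl | ho'
          · rcases not_and_or.1 hc with h1 | h2
            · exact absurd (by simpa using h1) hone
            · have h3 : ¬ PySem.Chars.find s.toList o.toList < j := h2
              omega
          · exact hlerest o ho' hone

-- the two function bodies agree (s plays the role of the stripped spec)
lemma pvMain_eq (s : String) :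
    (match pvOps.foldl (pvStepA s) none with
     | some k => PySem.Str.strip (PySem.Str.slice s none (some k))
     | none =>
       if PySem.Str.isIn "," s then
         PySem.Str.strip (((PySem.Str.split? s ",").getD []).headD "")
       else s)
    =
    (match pvFirstOp s.toList with
     | some i => PySem.Str.strip (PySem.Str.slice s none (some (i : Int)))
     | none =>
       if PySem.Str.isIn "," s then
         PySem.Str.strip (((PySem.Str.split? s ",").getD []).headD "")
       else s) := by
  cases hB : pvFirstOp s.toList with
  | none =>
    have hall := (pvFirstOp_none s.toList).1 hB
    have hA : pvOps.foldl (pvStepA s) none = none := by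
      rw [pvFoldA_none]
      intro op hop
      by_contra hne
      have hinf : op.toList <:+: s.toList :=
        (PySem.Chars.find_ne_neg_one_iff s.toList op.toList).1 hne
      have hin : PySem.Chars.isIn op.toList s.toList = true :=
        (PySem.Chars.isIn_iff_infix op.toList s.toList).2 hinf
      obtain ⟨j, hj⟩ := (PySem.Chars.exists_prefix_drop_iff_isIn op.toList s.toList).2 hin
      exact hall j ⟨op, hop, hj⟩
    rw [hA]
  | some i =>
    obtain ⟨⟨op0, hop0, hpre0⟩, hmin⟩ := pvFirstOp_some s.toList i hB
    obtain ⟨hne0, hle0⟩ := pvFind_le s.toList op0.toList i hpre0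
    cases hA : pvOps.foldl (pvStepA s) none with
    | none => exact absurd ((pvFoldA_none s pvOps).1 hA op0 hop0) hne0
    | some k =>
      obtain ⟨hk0, hor, -, hlerest⟩ := pvFoldA_some s pvOps none k (by simp) hA
      obtain ⟨o, ho, hfo⟩ : ∃ o ∈ pvOps, PySem.Chars.find s.toList o.toList = k := by
        rcases hor with he | h'; · simp at he
        · exact h'
      -- i ≤ k: the find that won is a hit position, and i is the least hit position
      have hko : 0 ≤ PySem.Chars.find s.toList o.toList := by omega
      have hpre : o.toList <+: s.toList.drop (PySem.Chars.find s.toList o.toList).toNat :=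
        (PySem.Chars.find_spec hko).1
      have hik : i ≤ (PySem.Chars.find s.toList o.toList).toNat := by
        by_contra hlt
        exact hmin _ (by omega) ⟨o, ho, hpre⟩
      -- k ≤ i: op0 occurs at i, and k is a lower bound on all finds
      have hki : k ≤ i := le_trans (hlerest op0 hop0 hne0) hle0
      have hk_eq : k = (i : Int) := by omega
      rw [hk_eq]

-- ===== VERDICT (by name: the statement is the Claim_ definition above) =====
theorem strip_version_from_spec_spec : Claim_equal_strip_version_from_spec := by
  intro spec _
  show strip_version_from_spec spec = strip_version_from_spec_alt spec
  exact pvMain_eq (PySem.Str.strip spec)
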